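-- pv_equiv track=rewrite | github.com/TDHoan205/LTUDP-PRAC-CLASS | Trần Đức Hoàn/Baitapchuong5/bainangcao.py | strip_ruby_comments
-- ===== SOURCE A (Python) =====
-- def strip_ruby_comments(source: str) -> str:
--     """Remove # comments and =begin...=end blocks from Ruby."""
--     lines = source.split('\n')
--     result, in_block = [], False
--     for line in lines:
--         stripped = line.strip()
--         if stripped.startswith('=begin'):
--             in_block = True
--             continue
--         if stripped.startswith('=end'):
--             in_block = False
--             continue
--         if in_block:
--             continue
--         idx = line.find('#')
--         if idx >= 0:
--             in_str = False
--             str_char = None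
--             clean_idx = len(line)
--             for j, c in enumerate(line):
--                 if in_str:
--                     if c == '\\':
--                         continue
--                     if c == str_char:
--                         in_str = False
--                 elif c in ('"', "'"):
--                     in_str = True
--                     str_char = c
--                 elif c == '#':
--                     clean_idx = j
--                     break
--             result.append(line[:clean_idx])
--         else:
--             result.append(line)
--     return '\n'.join(result)
-- ===== SOURCE B (Python) =====
-- # One linear pass over the source: no split('\n')/join, a current-line buffer,
-- # an emitted-anything flag for separators, and the kept part of a line built
-- # char by char (stopping at the first '#' outside a string literal).
--
-- def _cut(line):
--     kept = []
--     in_str = False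
--     q = ''
--     for c in line:
--         if not in_str and c == '#':
--             break
--         kept.append(c)
--         if in_str:
--             if c == q:
--                 in_str = False
--         elif c == '"' or c == "'":
--             in_str = True
--             q = c
--     return ''.join(kept)
--
--
-- def _emit(out, cur, first, in_block):
--     line = ''.join(cur)
--     s = line.strip()
--     if s.startswith('=begin'):
--         return first, True
--     if s.startswith('=end'):
--         return first, False
--     if in_block:
--         return first, in_block
--     if not first:
--         out.append('\n')
--     out.append(_cut(line))
--     return False, in_block
--
--
-- def strip_ruby_comments(source: str) -> str:
--     out = []
--     cur = []
--     first = True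
--     in_block = False
--     for c in source:
--         if c == '\n':
--             first, in_block = _emit(out, cur, first, in_block)
--             cur = []
--         else:
--             cur.append(c)
--     _emit(out, cur, first, in_block)
--     return ''.join(out)
-- ===== Notes on version B (the rewrite author's own statement) =====
-- stated objective: alternative
-- what changed: B replaces A's split-into-lines/process/join pipeline with a single character-level pass over the source that buffers the current line, inserts newline separators via a first-output flag, and builds each kept line prefix directly instead of computing a cut index with find plus an index-scanning loop and slicing.
import Mathlib
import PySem

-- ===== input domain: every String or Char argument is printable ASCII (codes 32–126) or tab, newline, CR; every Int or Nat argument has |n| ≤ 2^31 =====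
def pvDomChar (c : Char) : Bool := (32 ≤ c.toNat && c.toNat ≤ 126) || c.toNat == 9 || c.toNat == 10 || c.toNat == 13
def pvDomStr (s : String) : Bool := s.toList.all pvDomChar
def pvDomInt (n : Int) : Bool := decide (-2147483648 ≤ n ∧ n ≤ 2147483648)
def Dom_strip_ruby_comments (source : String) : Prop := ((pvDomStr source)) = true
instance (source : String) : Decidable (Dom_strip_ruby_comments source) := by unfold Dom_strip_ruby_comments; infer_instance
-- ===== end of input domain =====

-- B is a single character-level pass (no split/join); same return value as A, proved below.

-- ===== PORT A =====

-- A's inner loop: for j, c in enumerate(line) with in_str / str_char / clean_idx (default len(line)); break on '#'.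
def scanAGo (rest : List Char) (j : Nat) (inStr : Bool) (strChar : Option Char) (cleanIdx : Nat) : Nat :=
  match rest with
  | [] => cleanIdx
  | c :: r =>
    if inStr then
      if c = '\\' then scanAGo r (j + 1) inStr strChar cleanIdx
      else if some c = strChar then scanAGo r (j + 1) false strChar cleanIdx
      else scanAGo r (j + 1) inStr strChar cleanIdx
    else if c = '"' ∨ c = '\'' then scanAGo r (j + 1) true (some c) cleanIdx
    else if c = '#' then j
    else scanAGo r (j + 1) inStr strChar cleanIdx

-- the for-line loop of A, with result accumulated by append as Python does
def loopA (lines : List (List Char)) (inBlock : Bool) (result : List (List Char)) : List (List Char) :=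
  match lines with
  | [] => result
  | line :: ls =>
    let stripped := PySem.Chars.strip line
    if PySem.Chars.startswith stripped ("=begin".toList) then loopA ls true result
    else if PySem.Chars.startswith stripped ("=end".toList) then loopA ls false result
    else if inBlock then loopA ls inBlock result
    else
      let idx := PySem.Chars.find line ['#']
      if 0 ≤ idx then
        let cleanIdx := scanAGo line 0 false none line.length
        loopA ls inBlock (result ++ [PySem.List.slice line none (some (cleanIdx : Int))])
      else loopA ls inBlock (result ++ [line])

def strip_ruby_comments (source : String) : String :=
  let lines := PySem.Chars.splitOn source.toList ['\n']
  String.ofList (PySem.Chars.join ['\n'] (loopA lines false []))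

-- ===== PORT B =====

-- _cut: build the kept prefix of a line char by char, stopping at '#' outside a string
def cutB (line : List Char) (inStr : Bool) (q : Option Char) : List Char :=
  match line with
  | [] => []
  | c :: r =>
    if !inStr ∧ c = '#' then []
    else
      c :: (if inStr then
              (if some c = q then cutB r false q else cutB r inStr q)
            else if c = '"' ∨ c = '\'' then cutB r true (some c)
            else cutB r inStr q)

-- _emit: process one buffered line, returning (out, first, in_block)
def emitB (out : List Char) (cur : List Char) (first : Bool) (inBlock : Bool) :
    List Char × Bool × Bool :=
  let s := PySem.Chars.strip cur
  if PySem.Chars.startswith s ("=begin".toList) then (out, first, true)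
  else if PySem.Chars.startswith s ("=end".toList) then (out, first, false)
  else if inBlock then (out, first, inBlock)
  else (((if first then out else out ++ ['\n']) ++ cutB cur false none), false, inBlock)

-- the single pass over all characters of the source
def goB (cs : List Char) (inBlock : Bool) (first : Bool) (cur : List Char) (out : List Char) :
    List Char :=
  match cs with
  | [] => (emitB out cur first inBlock).1
  | c :: rest =>
    if c = '\n' then
      let e := emitB out cur first inBlock
      goB rest e.2.2 e.2.1 [] e.1
    else goB rest inBlock first (cur ++ [c]) out

def strip_ruby_comments_alt (source : String) : String :=
  String.ofList (goB source.toList false true [] [])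

-- ===== PRECONDITION & SPEC =====
def Spec_strip_ruby_comments (source : String) (out : String) : Prop := out = strip_ruby_comments_alt source
instance (source : String) (out : String) : Decidable (Spec_strip_ruby_comments source out) := by unfold Spec_strip_ruby_comments; infer_instance

-- ===== CLAIM (what is proved, stated in full; the proofs are below) =====
def Claim_equal_strip_ruby_comments : Prop := ∀ (source : String), Dom_strip_ruby_comments source → Spec_strip_ruby_comments source (strip_ruby_comments source)

-- ===== LEMMAS AND PROOFS =====

-- a simple structural split on '\n'
def mySplit (cs : List Char) : List (List Char) :=
  match cs with
  | [] => [[]]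
  | c :: r => if c = '\n' then [] :: mySplit r else List.modifyHead (c :: ·) (mySplit r)

def consHead (pre : List Char) (ls : List (List Char)) : List (List Char) :=
  match ls with
  | [] => [pre]
  | x :: xs => (pre ++ x) :: xs

theorem mySplit_ne_nil (cs : List Char) : mySplit cs ≠ [] := by
  induction cs with
  | nil => simp [mySplit]
  | cons c r ih =>
    simp only [mySplit]
    split
    · simp
    · cases h : mySplit r with
      | nil => exact absurd h ih
      | cons x xs => simp

theorem consHead_nil_eq (cs : List Char) : consHead [] (mySplit cs) = mySplit cs := by
  cases h : mySplit cs with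
  | nil => exact absurd h (mySplit_ne_nil cs)
  | cons x xs => simp [consHead]

theorem splitOn_go_eq (fuel : Nat) (l cur : List Char) (acc : List (List Char))
    (h : l.length < fuel) :
    PySem.Chars.splitOn.go ['\n'] fuel l cur acc = acc.reverse ++ consHead cur.reverse (mySplit l) := by
  induction fuel generalizing l cur acc with
  | zero => omega
  | succ f ih =>
    cases l with
    | nil => simp [PySem.Chars.splitOn.go, mySplit, consHead]
    | cons c r =>
      by_cases hc : c = '\n'
      · subst hc
        have hpre : List.isPrefixOf ['\n'] ('\n' :: r) = true := by
          simp [List.isPrefixOf]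
        simp only [PySem.Chars.splitOn.go, hpre, if_pos]
        rw [show List.drop ['\n'].length ('\n' :: r) = r by simp]
        rw [ih r [] (cur.reverse :: acc) (by simp at h ⊢; omega)]
        simp only [mySplit, List.reverse_cons, List.reverse_nil]
        rw [consHead_nil_eq]
        simp [consHead]
      · have hpre : List.isPrefixOf ['\n'] (c :: r) = false := by
          simp [List.isPrefixOf]
          intro hh; exact absurd hh.symm hc
        simp only [PySem.Chars.splitOn.go, hpre, Bool.false_eq_true, if_false]
        rw [ih r (c :: cur) acc (by simp at h ⊢; omega)]
        simp only [mySplit, if_neg hc, List.reverse_cons]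
        congr 1
        cases hm : mySplit r with
        | nil => exact absurd hm (mySplit_ne_nil r)
        | cons x xs => simp [consHead]

theorem splitOn_eq_mySplit (cs : List Char) :
    PySem.Chars.splitOn cs ['\n'] = mySplit cs := by
  have := splitOn_go_eq (cs.length + 1) cs [] [] (by omega)
  simpa [PySem.Chars.splitOn, consHead_nil_eq] using this

-- quote invariant: whenever inStr is true the stored quote is '"' or '\''
def QOk (inStr : Bool) (q : Option Char) : Prop :=
  inStr = true → q = some '"' ∨ q = some '\''

-- A's scan index equals the length of B's kept prefix
theorem scanAGo_eq_cut_length (r : List Char) (j : Nat) (inStr : Bool) (q : Option Char)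
    (hq : QOk inStr q) :
    scanAGo r j inStr q (j + r.length) = j + (cutB r inStr q).length := by
  induction r generalizing j inStr q with
  | nil => simp [scanAGo, cutB]
  | cons c rest ih =>
    have harith : j + (rest.length + 1) = (j + 1) + rest.length := by omega
    by_cases hs : inStr = true
    · subst hs
      by_cases hb : c = '\\'
      · have hne : ¬ (some '\\' = q) := by
          rcases hq rfl with h | h <;> simp [h]
        have h1 : scanAGo rest (j + 1) true q (j + (rest.length + 1))
            = (j + 1) + (cutB rest true q).length := by
          rw [harith]; exact ih (j + 1) true q hq
        simp only [scanAGo, cutB]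
        simp [hb, hne, h1]
        omega
      · by_cases hcq : some c = q
        · have h1 : scanAGo rest (j + 1) false q (j + (rest.length + 1))
              = (j + 1) + (cutB rest false q).length := by
            rw [harith]; exact ih (j + 1) false q (by intro h; cases h)
          simp only [scanAGo, cutB]
          simp [hb, hcq, h1]
          omega
        · have h1 : scanAGo rest (j + 1) true q (j + (rest.length + 1))
              = (j + 1) + (cutB rest true q).length := by
            rw [harith]; exact ih (j + 1) true q hq
          simp only [scanAGo, cutB]
          simp [hb, hcq, h1]
          omega
    · have hs' : inStr = false := by cases inStr <;> simp_all
      subst hs'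
      by_cases hquote : c = '"' ∨ c = '\''
      · have h1 : scanAGo rest (j + 1) true (some c) (j + (rest.length + 1))
            = (j + 1) + (cutB rest true (some c)).length := by
          rw [harith]
          exact ih (j + 1) true (some c) (by intro _; rcases hquote with h | h <;> simp [h])
        have hch : ¬ (c = '#') := by rcases hquote with h | h <;> simp [h]
        simp only [scanAGo, cutB]
        simp [hquote, hch, h1]
        omega
      · by_cases hhash : c = '#'
        · simp only [scanAGo, cutB]
          simp [hhash]
        · have h1 : scanAGo rest (j + 1) false q (j + (rest.length + 1))
              = (j + 1) + (cutB rest false q).length := by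
            rw [harith]; exact ih (j + 1) false q hq
          simp only [scanAGo, cutB]
          simp [hquote, hhash, h1]
          omega

-- cutB is a prefix of the line
theorem cutB_prefix (r : List Char) (inStr : Bool) (q : Option Char) :
    cutB r inStr q <+: r := by
  induction r generalizing inStr q with
  | nil => simp [cutB]
  | cons c rest ih =>
    simp only [cutB]
    split
    · exact List.nil_prefix
    · refine List.cons_prefix_cons.mpr ⟨rfl, ?_⟩
      split
      · split
        · exact ih _ _
        · exact ih _ _
      · split
        · exact ih _ _
        · exact ih _ _

-- when the line has no '#', the whole line is kept
theorem cutB_of_not_mem (r : List Char) (inStr : Bool) (q : Option Char)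
    (h : '#' ∉ r) : cutB r inStr q = r := by
  induction r generalizing inStr q with
  | nil => simp [cutB]
  | cons c rest ih =>
    have hc : c ≠ '#' := fun hh => h (hh ▸ List.mem_cons_self)
    have hrest : '#' ∉ rest := fun hh => h (List.mem_cons_of_mem _ hh)
    simp only [cutB]
    rw [if_neg (by rintro ⟨-, hh⟩; exact hc hh)]
    congr 1
    split
    · split <;> exact ih _ _ hrest
    · split <;> exact ih _ _ hrest

-- one line: A's kept text equals B's
theorem keptA_eq_cutB (line : List Char) :
    (if 0 ≤ PySem.Chars.find line ['#'] then
       PySem.List.slice line none (some ((scanAGo line 0 false none line.length : Nat) : Int))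
     else line) = cutB line false none := by
  by_cases hf : 0 ≤ PySem.Chars.find line ['#']
  · rw [if_pos hf, PySem.List.slice_to line (Int.natCast_nonneg _), Int.toNat_natCast]
    have hs := scanAGo_eq_cut_length line 0 false none (by intro h; cases h)
    simp only [Nat.zero_add] at hs
    rw [hs]
    exact ((List.prefix_iff_eq_take.mp (cutB_prefix line false none)).symm)
  · rw [if_neg hf]
    have h1 : PySem.Chars.find line ['#'] = -1 := by
      have := PySem.Chars.neg_one_le_find line ['#']
      omega
    have h2 : ¬ ['#'] <:+: line := (PySem.Chars.find_eq_neg_one_iff line ['#']).mp h1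
    have h3 : '#' ∉ line := by
      intro hm
      obtain ⟨s, t, hst⟩ := List.append_of_mem hm
      exact h2 ⟨s, t, by simp [hst]⟩
    exact (cutB_of_not_mem line false none h3).symm

-- the per-line loop of B
def loopB (lines : List (List Char)) (inBlock : Bool) (first : Bool) (out : List Char) :
    List Char :=
  match lines with
  | [] => out
  | l :: ls =>
    let e := emitB out l first inBlock
    loopB ls e.2.2 e.2.1 e.1

theorem goB_eq_loopB (cs : List Char) (ib first : Bool) (pre out : List Char) :
    goB cs ib first pre out = loopB (consHead pre (mySplit cs)) ib first out := by
  induction cs generalizing ib first pre out with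
  | nil => simp [goB, mySplit, consHead, loopB]
  | cons c rest ih =>
    by_cases hc : c = '\n'
    · subst hc
      simp only [goB, mySplit, consHead]
      rw [ih, consHead_nil_eq]
      simp [loopB]
    · simp only [goB, if_neg hc, mySplit]
      rw [ih]
      congr 1
      cases hm : mySplit rest with
      | nil => exact absurd hm (mySplit_ne_nil rest)
      | cons x xs => simp [consHead]

theorem join_append_singleton (sep : List Char) (acc : List (List Char)) (x : List Char) :
    PySem.Chars.join sep (acc ++ [x]) =
      (if acc = [] then [] else PySem.Chars.join sep acc ++ sep) ++ x := by
  induction acc with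
  | nil => simp [PySem.Chars.join, List.intercalate]
  | cons a acc' ih =>
    cases acc' with
    | nil => simp [PySem.Chars.join, List.intercalate]
    | cons b t =>
      have h1 : PySem.Chars.join sep (a :: ((b :: t) ++ [x])) =
          a ++ sep ++ PySem.Chars.join sep ((b :: t) ++ [x]) := by
        simp [PySem.Chars.join, List.intercalate]
      have h2 : PySem.Chars.join sep (a :: b :: t) =
          a ++ sep ++ PySem.Chars.join sep (b :: t) := by
        simp [PySem.Chars.join, List.intercalate]
      rw [List.cons_append, h1, ih, h2]
      simp

theorem loopA_eq_loopB (lines : List (List Char)) (ib : Bool) (acc : List (List Char))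
    (out : List Char) (first : Bool)
    (hout : out = PySem.Chars.join ['\n'] acc) (hfirst : first = acc.isEmpty) :
    PySem.Chars.join ['\n'] (loopA lines ib acc) = loopB lines ib first out := by
  induction lines generalizing ib acc out first with
  | nil => simp [loopA, loopB, hout]
  | cons line ls ih =>
    simp only [loopA, loopB, emitB]
    by_cases h1 : PySem.Chars.startswith (PySem.Chars.strip line) ("=begin".toList) = true
    · rw [if_pos h1, if_pos h1]
      exact ih true acc out first hout hfirst
    · rw [if_neg h1, if_neg h1]
      by_cases h2 : PySem.Chars.startswith (PySem.Chars.strip line) ("=end".toList) = true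
      · rw [if_pos h2, if_pos h2]
        exact ih false acc out first hout hfirst
      · rw [if_neg h2, if_neg h2]
        by_cases h3 : ib = true
        · rw [if_pos h3, if_pos h3]
          exact ih ib acc out first hout hfirst
        · rw [if_neg h3, if_neg h3]
          have hkept :
              (if 0 ≤ PySem.Chars.find line ['#'] then
                loopA ls ib (acc ++ [PySem.List.slice line none
                  (some ((scanAGo line 0 false none line.length : Nat) : Int))])
              else loopA ls ib (acc ++ [line])) =
              loopA ls ib (acc ++ [cutB line false none]) := by
            by_cases hf : 0 ≤ PySem.Chars.find line ['#']
            · rw [if_pos hf]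
              have := keptA_eq_cutB line
              rw [if_pos hf] at this
              rw [this]
            · rw [if_neg hf]
              have := keptA_eq_cutB line
              rw [if_neg hf] at this
              rw [← this]
          rw [hkept]
          apply ih
          · rw [join_append_singleton]
            cases acc with
            | nil =>
              simp at hfirst
              simp [hfirst, hout, PySem.Chars.join, List.intercalate]
            | cons a t =>
              simp at hfirst
              simp [hfirst, hout]
          · simp

-- ===== VERDICT (by name: the statement is the Claim_ definition above) =====
theorem strip_ruby_comments_spec : Claim_equal_strip_ruby_comments := by
  intro source _
  show String.ofList (PySem.Chars.join ['\n']
      (loopA (PySem.Chars.splitOn source.toList ['\n']) false [])) =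
    String.ofList (goB source.toList false true [] [])
  rw [splitOn_eq_mySplit, goB_eq_loopB, consHead_nil_eq]
  congr 1
  exact loopA_eq_loopB _ false [] [] true (by simp [PySem.Chars.join, List.intercalate]) (by simp)
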